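-- pv_equiv track=rewrite | github.com/smohapatra1/scripting | python/practice/start_again/2024/06052024/mandragora_forest.py | mandragora
-- ===== SOURCE A (Python) =====
-- def mandragora(H):
--     # Write your code here
--     H.sort()
--     s = 1
--     Tsum = sum(H)
--     for i in range(0, len(H)):
--         saveVal = (s+1) * (Tsum - H[i])
--         eatVal = s*Tsum
--         if saveVal > eatVal:
--             s += 1
--             Tsum -= H[i]
--         else:
--             return eatVal
-- ===== SOURCE B (Python) =====
-- def mandragora(H):
--     H.sort()
--     S = 0
--     res = None
--     for k, h in reversed(list(enumerate(H))):
--         S += h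
--         if S <= (k + 2) * h:
--             res = (k + 1) * S
--     return res
-- ===== Notes on version B (the rewrite author's own statement) =====
-- stated objective: alternative
-- what changed: Replaces A's forward greedy scan with mutable state (s, Tsum), a save-vs-eat comparison at each step and an early return, by a single backward pass over reversed(enumerate(H)) that accumulates the suffix sum and overwrites the result at every qualifying split, so the leftmost qualifying split survives and no early exit is needed.
-- outside the precondition, e.g. on mandragora([]): A returns None, B returns None; on mandragora([-1]): A returns None, B returns None
import Mathlib
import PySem

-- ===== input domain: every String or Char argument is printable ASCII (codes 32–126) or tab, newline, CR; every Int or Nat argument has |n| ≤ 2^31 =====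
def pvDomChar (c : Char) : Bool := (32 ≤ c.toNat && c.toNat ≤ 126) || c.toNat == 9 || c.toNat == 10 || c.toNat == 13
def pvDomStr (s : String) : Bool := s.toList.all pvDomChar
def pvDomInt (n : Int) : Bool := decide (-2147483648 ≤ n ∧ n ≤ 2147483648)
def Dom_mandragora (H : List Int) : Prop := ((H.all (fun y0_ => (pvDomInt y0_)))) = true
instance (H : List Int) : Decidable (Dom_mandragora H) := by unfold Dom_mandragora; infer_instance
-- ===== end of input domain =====

-- B replaces A's forward greedy scan (save/eat comparison, early return) by a single backward pass
-- over the reversed enumerated list that overwrites with each qualifying split, keeping the leftmost.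
-- Both Pythons sort H in place; the equivalence proved here is about the return value.

-- ===== PORT A =====
-- A's for-loop over i with state (s, Tsum); walking i through sorted H = walking the list
def mandragoraGo : List Int → Int → Int → Option Int
  | [], _, _ => none
  | h :: t, s, Tsum =>
      let saveVal := (s + 1) * (Tsum - h)
      let eatVal := s * Tsum
      if saveVal > eatVal then mandragoraGo t (s + 1) (Tsum - h)
      else some eatVal

def mandragora (H : List Int) : Int :=
  let hs := (PySem.List.sorted H (fun x => x))
  (mandragoraGo hs 1 hs.sum).getD 0   -- Python returns None when the loop falls through: excluded by Pre_

-- ===== PORT B =====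
-- the body of B's backward loop: state (S, res), one enumerated element (k, h)
def altStep (st : Int × Option Int) (kh : Int × Int) : Int × Option Int :=
  let S := st.1 + kh.2
  (S, if S ≤ (kh.1 + 2) * kh.2 then some ((kh.1 + 1) * S) else st.2)

def mandragora_alt (H : List Int) : Int :=
  let hs := (PySem.List.sorted H (fun x => x))
  (((PySem.List.enumerate hs).reverse).foldl altStep (0, none)).2.getD 0
  -- returns None in exactly the same cases as A: excluded by Pre_

-- ===== PRECONDITION & SPEC =====
-- Pre_ excludes exactly the inputs on which A's loop falls through (or H is empty) and A returns
-- None, not an int: those with no index k with sum(sorted(H)[k:]) <= (k+2)*sorted(H)[k]; B also returns None there.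
def Pre_mandragora (H : List Int) : Prop :=
  ∃ k < H.length, (((PySem.List.sorted H (fun x => x))).drop k).sum ≤ ((k : Int) + 2) * (((PySem.List.sorted H (fun x => x))).getD k 0)
instance (H : List Int) : Decidable (Pre_mandragora H) := by unfold Pre_mandragora; infer_instance

def pvWitness_mandragora : List Int := [3, 2, 2]

def Spec_mandragora (H : List Int) (out : Int) : Prop := out = mandragora_alt H
instance (H : List Int) (out : Int) : Decidable (Spec_mandragora H out) := by unfold Spec_mandragora; infer_instance

-- ===== CLAIM =====
def Claim_equal_mandragora : Prop := ∀ (H : List Int), Dom_mandragora H → Pre_mandragora H → Spec_mandragora H (mandragora H)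

-- ===== LEMMAS AND PROOFS =====

-- the backward fold over the enumeration of t starting at k computes (sum t, A's scan result)
lemma foldl_rev_enum (t : List Int) (k : Int) :
    ((PySem.List.enumerate t k).reverse).foldl altStep (0, none)
      = (t.sum, mandragoraGo t (k + 1) t.sum) := by
  induction t generalizing k with
  | nil => simp [PySem.List.enumerate_nil, mandragoraGo]
  | cons h t ih =>
      rw [PySem.List.enumerate_cons, List.reverse_cons, List.foldl_append, ih]
      simp only [List.foldl_cons, List.foldl_nil, altStep, mandragoraGo, List.sum_cons, Prod.mk.injEq]
      constructor
      · ring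
      · by_cases hc : t.sum + h ≤ (k + 2) * h
        · rw [if_pos hc, if_neg (by nlinarith)]
          congr 1; ring
        · rw [if_neg hc, if_pos (by nlinarith)]
          rw [show h + t.sum - h = t.sum by ring, show k + 1 + 1 = (k + 1) + 1 by ring]

-- ===== VERDICT =====
theorem mandragora_spec : Claim_equal_mandragora := by
  intro H _ _
  show (mandragoraGo (PySem.List.sorted H (fun x => x)) 1
          (PySem.List.sorted H (fun x => x)).sum).getD 0 =
       ((((PySem.List.enumerate (PySem.List.sorted H (fun x => x)) 0).reverse).foldl
          altStep (0, none)).2).getD 0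
  rw [foldl_rev_enum, show (0 : Int) + 1 = 1 by ring]
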